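-- pv_equiv track=rewrite | github.com/peter1010/cd_rip | rip_lib/main.py | replace_chars
-- ===== SOURCE A (Python) =====
-- def replace_chars(line, chars="\\\'\" (){}[]<>"):
--     """Replace some characters in string"""
--     line = line.strip()
--     for char in chars:
--         idx = 0
--         while idx >= 0:
--             idx = line.find(char, idx)
--             if idx >= 0:
--                 line = line[:idx] + "_" + line[idx+1:]
--                 idx = idx+1
--     while 1:
--         idx = line.find("__")
--         if idx >= 0:
--             line = line[:idx] + line[idx+1:]
--         else:
--             break
--
--     return line.strip()
-- ===== SOURCE B (Python) =====
-- def replace_chars(line, chars="\\\'\" (){}[]<>"):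
--     """Replace some characters in string"""
--     bad = set(chars)
--     out = []
--     prev_us = False
--     for ch in line.strip():
--         c = '_' if ch in bad else ch
--         if c == '_':
--             if not prev_us:
--                 out.append('_')
--             prev_us = True
--         else:
--             out.append(c)
--             prev_us = False
--     return ''.join(out).strip()
-- ===== Notes on version B (the rewrite author's own statement) =====
-- stated objective: faster
-- what changed: A rebuilds the string once per found occurrence (one find-loop per replacement char) and then repeatedly rescans from the start to collapse adjacent underscore pairs; B does one streaming pass over the stripped line with a set of bad chars and a previous-was-underscore flag, emitting each mapped char at most once.
import Mathlib
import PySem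

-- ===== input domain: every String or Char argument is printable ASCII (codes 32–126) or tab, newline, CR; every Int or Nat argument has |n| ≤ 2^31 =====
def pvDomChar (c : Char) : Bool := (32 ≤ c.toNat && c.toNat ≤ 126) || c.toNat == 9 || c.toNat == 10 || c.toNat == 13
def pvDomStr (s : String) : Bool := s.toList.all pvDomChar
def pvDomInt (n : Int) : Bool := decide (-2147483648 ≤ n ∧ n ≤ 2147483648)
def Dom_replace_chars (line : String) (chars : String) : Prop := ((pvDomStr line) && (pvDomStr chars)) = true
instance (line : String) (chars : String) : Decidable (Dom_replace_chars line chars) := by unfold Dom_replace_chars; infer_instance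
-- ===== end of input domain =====

-- B replaces A's per-character find/rebuild loops and repeated '__'-collapse rescans by one
-- streaming pass with a previous-was-underscore flag (objective: faster, single pass).

-- ===== PORT A =====
-- inner 'while idx >= 0' loop of A: find char from idx, splice '_' in, continue at idx+1
def pvAReplaceLoop (ch : Char) (line : List Char) (idx : Nat) : List Char :=
  if h : 0 ≤ PySem.Chars.findFrom line [ch] (idx : Int) then
    pvAReplaceLoop ch
      (PySem.List.slice line none (some (PySem.Chars.findFrom line [ch] (idx : Int))) ++ ['_'] ++
        PySem.List.slice line (some (PySem.Chars.findFrom line [ch] (idx : Int) + 1)) none)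
      ((PySem.Chars.findFrom line [ch] (idx : Int)).toNat + 1)
  else
    line
  termination_by line.length + 1 - idx
  decreasing_by
    have hidx : idx ≤ line.length := by
      by_contra hgt
      have : PySem.Chars.findFrom line [ch] (idx : Int) = -1 := by
        simp only [PySem.Chars.findFrom]
        have : (line.length : Int) < (idx : Int) := by exact_mod_cast Nat.lt_of_not_le hgt
        split <;> omega
      omega
    have hne : PySem.Chars.findFrom line [ch] (idx : Int) ≠ -1 := by omega
    obtain ⟨h1, h2, -⟩ := PySem.Chars.findFrom_natCast_spec line [ch] idx hidx hne
    have hlt : (PySem.Chars.findFrom line [ch] (idx : Int)).toNat < line.length := by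
      rcases h2 with ⟨t, ht⟩
      have := congrArg List.length ht
      simp [List.length_drop] at this
      omega
    have hl1 : (PySem.List.slice line none (some (PySem.Chars.findFrom line [ch] (idx : Int)))).length
        = (PySem.Chars.findFrom line [ch] (idx : Int)).toNat := by
      rw [PySem.List.slice_to _ h]
      simp [List.length_take]; omega
    have hl2 : (PySem.List.slice line (some (PySem.Chars.findFrom line [ch] (idx : Int) + 1)) none).length
        = line.length - ((PySem.Chars.findFrom line [ch] (idx : Int)).toNat + 1) := by
      rw [PySem.List.slice_from _ (by omega)]
      simp [List.length_drop]
      congr 1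
      omega
    simp only [List.length_append, hl1, hl2, List.length_singleton]
    omega

-- 'while 1: idx = line.find("__"); remove one char or break' loop of A
def pvACollapse (line : List Char) : List Char :=
  if h : 0 ≤ PySem.Chars.find line ['_', '_'] then
    pvACollapse (PySem.List.slice line none (some (PySem.Chars.find line ['_', '_'])) ++
      PySem.List.slice line (some (PySem.Chars.find line ['_', '_'] + 1)) none)
  else
    line
  termination_by line.length
  decreasing_by
    obtain ⟨h2, -⟩ := PySem.Chars.find_spec h
    have hlt : (PySem.Chars.find line ['_', '_']).toNat + 1 < line.length := by
      rcases h2 with ⟨t, ht⟩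
      have := congrArg List.length ht
      simp [List.length_drop] at this
      omega
    have hl1 : (PySem.List.slice line none (some (PySem.Chars.find line ['_', '_']))).length
        = (PySem.Chars.find line ['_', '_']).toNat := by
      rw [PySem.List.slice_to _ h]
      simp [List.length_take]; omega
    have hl2 : (PySem.List.slice line (some (PySem.Chars.find line ['_', '_'] + 1)) none).length
        = line.length - ((PySem.Chars.find line ['_', '_']).toNat + 1) := by
      rw [PySem.List.slice_from _ (by omega)]
      simp [List.length_drop]
      congr 1
      omega
    simp only [List.length_append, hl1, hl2]
    omega

def replace_chars (line : String) (chars : String) : String :=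
  let s := PySem.Chars.strip line.toList
  let s := chars.toList.foldl (fun acc ch => pvAReplaceLoop ch acc 0) s
  String.ofList (PySem.Chars.strip (pvACollapse s))

-- ===== PORT B =====
-- body of B's for-loop: state is (out, prev_us)
def pvBStep (bad : PySem.Set Char) (st : List Char × Bool) (ch : Char) : List Char × Bool :=
  let c := if ch ∈ bad then '_' else ch
  if c = '_' then
    if st.2 then st else (st.1 ++ ['_'], true)
  else
    (st.1 ++ [c], false)

def replace_chars_alt (line : String) (chars : String) : String :=
  let bad := PySem.Set.ofList chars.toList
  let st := (PySem.Chars.strip line.toList).foldl (pvBStep bad) ([], false)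
  String.ofList (PySem.Chars.strip st.1)

-- ===== PRECONDITION & SPEC =====
def Spec_replace_chars (line : String) (chars : String) (out : String) : Prop := out = replace_chars_alt line chars
instance (line : String) (chars : String) (out : String) : Decidable (Spec_replace_chars line chars out) := by unfold Spec_replace_chars; infer_instance

-- ===== CLAIM (what is proved, stated in full; the proofs are below) =====
def Claim_equal_replace_chars : Prop := ∀ (line : String) (chars : String), Dom_replace_chars line chars → Spec_replace_chars line chars (replace_chars line chars)

-- ===== LEMMAS AND PROOFS =====


-- helper: the pure per-char replacement A's inner loop performs
def pvMap1 (ch c : Char) : Char := if c = ch then '_' else c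

-- helper: the combined replacement of A's outer for-loop
def pvG (chars : List Char) (c : Char) : Char := if c ∈ chars then '_' else c

-- helper: collapsing runs of '_' to a single '_'
def pvSqueeze : List Char → List Char
  | [] => []
  | [c] => [c]
  | a :: b :: t => if a = '_' ∧ b = '_' then pvSqueeze (b :: t) else a :: pvSqueeze (b :: t)

-- helper: recursive form of B's streaming pass
def pvScan (bad : PySem.Set Char) : List Char → Bool → List Char
  | [], _ => []
  | c :: s, prev =>
    if (if c ∈ bad then '_' else c) = '_' then
      (if prev then pvScan bad s true else '_' :: pvScan bad s true)
    else (if c ∈ bad then '_' else c) :: pvScan bad s false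

theorem pv_single_prefix_drop (c : Char) (l : List Char) (k : Nat) :
    [c] <+: l.drop k ↔ l[k]? = some c := by
  rw [← List.head?_drop]
  rcases l.drop k with _ | ⟨a, t⟩
  · simp
  · constructor
    · rintro ⟨t', ht'⟩
      simp_all
    · intro h
      simp at h
      exact ⟨t, by simp [h]⟩

theorem pvAReplaceLoop_eq (ch : Char) (l : List Char) (idx : Nat) (hidx : idx ≤ l.length) :
    pvAReplaceLoop ch l idx = l.take idx ++ (l.drop idx).map (pvMap1 ch) := by
  fun_induction pvAReplaceLoop ch l idx with
  | case1 l idx h ih =>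
    set j := PySem.Chars.findFrom l [ch] (idx : Int) with hj
    have hne : j ≠ -1 := by omega
    obtain ⟨h1, h2, h3⟩ := PySem.Chars.findFrom_natCast_spec l [ch] idx hidx hne
    set n := j.toNat with hn
    have hin : idx ≤ n := by omega
    obtain ⟨t, ht⟩ := h2
    have ht : l.drop n = ch :: t := by simpa using ht.symm
    have hnlt : n < l.length := by
      have := congrArg List.length ht
      simp [List.length_drop] at this
      omega
    have hs1 : PySem.List.slice l none (some j) = l.take n := by
      rw [PySem.List.slice_to _ h]
    have hs2 : PySem.List.slice l (some (j + 1)) none = l.drop (n + 1) := by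
      rw [PySem.List.slice_from _ (by omega)]
      congr 1
      omega
    rw [hs1, hs2] at ih ⊢
    have hdt : l.drop (n + 1) = t := by
      have : l.drop (n + 1) = (l.drop n).drop 1 := by
        rw [List.drop_drop]
      rw [this, ht, List.drop_one, List.tail_cons]
    have htk : (l.take n).length = n := by simp; omega
    have hlen : (l.take n ++ ['_'] ++ l.drop (n + 1)).length = l.length := by
      simp [htk]
      omega
    rw [ih (by rw [hlen]; omega)]
    have hpre : ((l.take n ++ ['_']) ++ l.drop (n + 1)).take (n + 1) = l.take n ++ ['_'] := by
      rw [List.take_left' (by simp [htk])]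
    have hdrop : ((l.take n ++ ['_']) ++ l.drop (n + 1)).drop (n + 1) = l.drop (n + 1) := by
      rw [List.drop_left' (by simp [htk])]
    rw [List.append_assoc (l.take n) ['_'] (l.drop (n+1))] at hpre hdrop ⊢
    rw [← List.append_assoc (l.take n) ['_'] (l.drop (n+1))] at hpre hdrop ⊢
    rw [hpre, hdrop, hdt]
    -- now: take n ++ ['_'] ++ map f t = take idx ++ map f (drop idx)
    have hseg : ∀ x ∈ (l.drop idx).take (n - idx), pvMap1 ch x = x := by
      intro x hx
      rw [List.mem_iff_getElem] at hx
      obtain ⟨i, hi, hxi⟩ := hx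
      have hilt : i < n - idx := by
        simp [List.length_take, List.length_drop] at hi
        omega
      have hij : idx + i < l.length := by omega
      simp only [List.getElem_take, List.getElem_drop] at hxi
      have hnc : ¬ [ch] <+: l.drop (idx + i) := h3 (idx + i) (by omega) (by omega)
      rw [pv_single_prefix_drop] at hnc
      have hx2 : l[idx + i]? = some x := by
        rw [List.getElem?_eq_getElem hij, hxi]
      have hxch : x ≠ ch := by
        intro hxx
        exact hnc (by rw [hx2, hxx])
      simp [pvMap1, hxch]
    have hsplit : l.drop idx = (l.drop idx).take (n - idx) ++ ch :: t := by
      conv_lhs => rw [← List.take_append_drop (n - idx) (l.drop idx)]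
      rw [List.drop_drop]
      congr 1
      rw [← ht]
      congr 1
      omega
    rw [hsplit, List.map_append, List.map_congr_left hseg, List.map_cons]
    have hf : pvMap1 ch ch = '_' := by simp [pvMap1]
    rw [hf]
    have htake : l.take n = l.take idx ++ (l.drop idx).take (n - idx) := by
      rw [← List.take_add]
      congr 1
      omega
    rw [htake]
    simp
  | case2 l idx h =>
    have hfe : PySem.Chars.findFrom l [ch] (idx : Int) = -1 := by
      by_cases hc : PySem.Chars.find (l.drop idx) [ch] = -1
      · rw [PySem.Chars.findFrom_natCast l [ch] idx hidx, if_pos hc]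
      · exfalso
        have := PySem.Chars.neg_one_le_find (l.drop idx) [ch]
        rw [PySem.Chars.findFrom_natCast l [ch] idx hidx, if_neg hc] at h
        omega
    rw [PySem.Chars.findFrom_natCast_eq_neg_one_iff l [ch] idx hidx] at hfe
    have hmap : ∀ x ∈ l.drop idx, pvMap1 ch x = x := by
      intro x hx
      have hxch : x ≠ ch := by
        rintro rfl
        obtain ⟨s, t, hst⟩ := List.append_of_mem hx
        exact hfe ⟨s, t, by simp [hst]⟩
      simp [pvMap1, hxch]
    rw [List.map_congr_left hmap]
    simp

theorem pvAReplaceLoop_zero (ch : Char) (line : List Char) :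
    pvAReplaceLoop ch line 0 = line.map (pvMap1 ch) := by
  simpa using pvAReplaceLoop_eq ch line 0 (Nat.zero_le _)

theorem pv_fold_replace (cs : List Char) (s : List Char) :
    cs.foldl (fun acc ch => pvAReplaceLoop ch acc 0) s = s.map (pvG cs) := by
  induction cs generalizing s with
  | nil =>
    have h0 : ∀ x ∈ s, pvG [] x = id x := by simp [pvG]
    rw [List.foldl_nil, List.map_congr_left h0, List.map_id]
  | cons c cs ih =>
    rw [List.foldl_cons, pvAReplaceLoop_zero, ih, List.map_map]
    refine List.map_congr_left ?_
    intro x _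
    simp only [Function.comp, pvMap1, pvG, List.mem_cons]
    by_cases hx : x = c <;> simp [hx]

theorem pvSqueeze_cons_ne (m : Char) (t : List Char) (hm : m ≠ '_') :
    pvSqueeze (m :: t) = m :: pvSqueeze t := by
  cases t <;> simp [pvSqueeze, hm]

theorem pvSqueeze_cons₂ (a b : Char) (t : List Char) (hb : b ≠ '_') :
    pvSqueeze (a :: b :: t) = a :: b :: pvSqueeze t := by
  simp [pvSqueeze, hb, pvSqueeze_cons_ne b t hb]

theorem pvSqueeze_dd (u v : List Char) :
    pvSqueeze (u ++ '_' :: '_' :: v) = pvSqueeze (u ++ '_' :: v) := by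
  induction u with
  | nil => simp [pvSqueeze]
  | cons a u ih =>
    by_cases ha : a = '_'
    · subst ha
      cases u with
      | nil => simp [pvSqueeze]
      | cons b u' =>
        by_cases hb : b = '_' <;>
          simp_all [pvSqueeze]
    · rw [List.cons_append, List.cons_append, pvSqueeze_cons_ne a _ ha, pvSqueeze_cons_ne a _ ha, ih]

theorem pvSqueeze_of_no_dd (l : List Char) (h : ¬ ['_', '_'] <:+: l) : pvSqueeze l = l := by
  induction l with
  | nil => rfl
  | cons a t ih =>
    have ht : ¬ ['_', '_'] <:+: t := fun hi => h (hi.trans (List.suffix_cons a t).isInfix)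
    cases t with
    | nil => rfl
    | cons b t' =>
      have hab : ¬ (a = '_' ∧ b = '_') := by
        rintro ⟨rfl, rfl⟩
        exact h ⟨[], t', rfl⟩
      simp [pvSqueeze, hab, ih ht]

theorem pvACollapse_eq (l : List Char) : pvACollapse l = pvSqueeze l := by
  fun_induction pvACollapse l with
  | case1 l h ih =>
    set j := PySem.Chars.find l ['_', '_'] with hj
    obtain ⟨h2, -⟩ := PySem.Chars.find_spec h
    set n := j.toNat with hn
    obtain ⟨t, ht⟩ := h2
    have ht : l.drop n = '_' :: '_' :: t := by simpa using ht.symm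
    have hnlt : n + 1 < l.length := by
      have := congrArg List.length ht
      simp [List.length_drop] at this
      omega
    have hs1 : PySem.List.slice l none (some j) = l.take n := by
      rw [PySem.List.slice_to _ h]
    have hs2 : PySem.List.slice l (some (j + 1)) none = l.drop (n + 1) := by
      rw [PySem.List.slice_from _ (by omega)]
      congr 1
      omega
    rw [hs1, hs2] at ih ⊢
    have hdt : l.drop (n + 1) = '_' :: t := by
      have : l.drop (n + 1) = (l.drop n).drop 1 := by rw [List.drop_drop]
      rw [this, ht, List.drop_one, List.tail_cons]
    rw [ih, hdt]
    conv_rhs => rw [← List.take_append_drop n l, ht]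
    exact (pvSqueeze_dd (l.take n) t).symm
  | case2 l h =>
    have hfe : PySem.Chars.find l ['_', '_'] = -1 := by
      have := PySem.Chars.neg_one_le_find l ['_', '_']
      omega
    rw [PySem.Chars.find_eq_neg_one_iff] at hfe
    exact (pvSqueeze_of_no_dd l hfe).symm

theorem pvBStep_foldl (bad : PySem.Set Char) (s : List Char) (out : List Char) (prev : Bool) :
    (s.foldl (pvBStep bad) (out, prev)).1 = out ++ pvScan bad s prev := by
  induction s generalizing out prev with
  | nil => simp [pvScan]
  | cons c s ih =>
    simp only [List.foldl_cons, pvScan]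
    by_cases hc : (if c ∈ bad then '_' else c) = '_'
    · cases prev <;> simp [pvBStep, hc, ih]
    · simp [pvBStep, hc, ih]

theorem pvScan_eq (bad : PySem.Set Char) (s : List Char) :
    pvScan bad s false = pvSqueeze (s.map (fun c => if c ∈ bad then '_' else c)) ∧
      '_' :: pvScan bad s true = pvSqueeze ('_' :: s.map (fun c => if c ∈ bad then '_' else c)) := by
  induction s with
  | nil => simp [pvScan, pvSqueeze]
  | cons c s ih =>
    by_cases hc : (if c ∈ bad then '_' else c) = '_'
    · constructor
      · rw [List.map_cons, hc, pvScan, if_pos hc, if_neg (by simp)]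
        exact ih.2
      · rw [List.map_cons, hc]
        show '_' :: pvScan bad (c :: s) true = pvSqueeze ('_' :: '_' :: _)
        rw [pvScan, if_pos hc, if_pos rfl]
        simpa [pvSqueeze] using ih.2
    · constructor
      · rw [List.map_cons, pvScan, if_neg hc, pvSqueeze_cons_ne _ _ hc]
        exact congrArg _ ih.1
      · rw [List.map_cons, pvScan, if_neg hc, pvSqueeze_cons₂ _ _ _ hc]
        simp [ih.1]

-- ===== VERDICT (by name: the statement is the Claim_ definition above) =====

theorem replace_chars_spec : Claim_equal_replace_chars := by
  intro line chars _
  simp only [Spec_replace_chars, replace_chars, replace_chars_alt]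
  rw [pv_fold_replace, pvACollapse_eq, pvBStep_foldl, List.nil_append,
    (pvScan_eq (PySem.Set.ofList chars.toList) (PySem.Chars.strip line.toList)).1]
  have hmem : ∀ x ∈ PySem.Chars.strip line.toList,
      pvG chars.toList x = (fun c => if c ∈ PySem.Set.ofList chars.toList then '_' else c) x := by
    intro x _
    simp [pvG, PySem.Set.mem_ofList]
  rw [List.map_congr_left hmem]
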